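-- pv_equiv track=rewrite | github.com/patrickmarcel/SQLWL-segmentation | accord.py | creer_matrice
-- ===== SOURCE A (Python) =====
-- def creer_matrice(matrix):
--     matrice = []
--     for i in matrix[0]:
--         matrice.append([0,0])
--     for i in range(len(matrix)):
--         for j in range(len(matrix[i])):
--             if(matrix[i][j] == 0):
--                 matrice[j][1] = matrice[j][1] + 1
--             else:
--                 matrice[j][0] = matrice[j][0] + 1
--     return matrice
-- ===== SOURCE B (Python) =====
-- def creer_matrice(matrix):
--     n = len(matrix[0])
--     matrice = []
--     for j in range(n):
--         col = [row[j] for row in matrix if j < len(row)]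
--         nonzeros = sum(1 for x in col if x != 0)
--         matrice.append([nonzeros, len(col) - nonzeros])
--     return matrice
-- ===== Notes on version B (the rewrite author's own statement) =====
-- stated objective: alternative
-- what changed: B scans column-major: for each column index j it gathers the column's entries, counts non-zeros once, and derives the zero count by subtraction, instead of A's row-major scan maintaining two incrementing accumulators per column.
import Mathlib
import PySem

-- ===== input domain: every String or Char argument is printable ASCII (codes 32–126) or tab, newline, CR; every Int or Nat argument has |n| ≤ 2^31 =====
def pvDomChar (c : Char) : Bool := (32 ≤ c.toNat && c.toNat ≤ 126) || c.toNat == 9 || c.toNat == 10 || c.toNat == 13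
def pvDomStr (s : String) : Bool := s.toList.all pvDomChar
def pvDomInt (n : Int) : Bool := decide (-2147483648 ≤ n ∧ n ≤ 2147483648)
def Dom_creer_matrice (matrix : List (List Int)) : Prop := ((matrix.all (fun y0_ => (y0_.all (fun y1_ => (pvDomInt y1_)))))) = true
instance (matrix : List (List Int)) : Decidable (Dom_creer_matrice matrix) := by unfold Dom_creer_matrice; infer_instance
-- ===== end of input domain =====

-- B counts column-major (one non-zero count per column, zeros by subtraction) instead of A's
-- row-major scan with two incrementing accumulators; alternative decomposition, same cost.

-- ===== PORT A =====
-- the body of A's if/else: bump matrice[j][1] if the entry is 0, else matrice[j][0]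
def pvBumpCell (x : Int) (c : List Int) : List Int :=
  if x = 0 then c.modify 1 (· + 1) else c.modify 0 (· + 1)

-- A's inner loop: for j in range(len(matrix[i])): …
def pvRowStep (acc : List (List Int)) (row : List Int) : List (List Int) :=
  (List.range row.length).foldl (fun acc j => acc.modify j (pvBumpCell (row.getD j 0))) acc

def creer_matrice (matrix : List (List Int)) : List (List Int) :=
  let matrice := (matrix.headD []).map (fun _ => ([0, 0] : List Int))
  matrix.foldl pvRowStep matrice

-- ===== PORT B =====
def creer_matrice_alt (matrix : List (List Int)) : List (List Int) :=
  let n := (matrix.headD []).length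
  (List.range n).map (fun j =>
    let col := (matrix.filter (fun row => decide (j < row.length))).map (fun row => row.getD j 0)
    let nonzeros := (col.filter (fun x => decide (x ≠ 0))).length
    [(nonzeros : Int), (col.length : Int) - (nonzeros : Int)])

-- ===== PRECONDITION & SPEC =====
-- Pre_ excludes exactly the inputs where Python A raises IndexError: the empty matrix
-- (matrix[0]) and jagged matrices with a row longer than the first row (matrice[j]).
def Pre_creer_matrice (matrix : List (List Int)) : Prop :=
  matrix ≠ [] ∧ ∀ r ∈ matrix, r.length ≤ (matrix.headD []).length
instance (matrix : List (List Int)) : Decidable (Pre_creer_matrice matrix) := by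
  unfold Pre_creer_matrice; infer_instance
def pvWitness_creer_matrice : List (List Int) := [[1, 0, 2], [0, 0, 3]]

def Spec_creer_matrice (matrix : List (List Int)) (out : List (List Int)) : Prop := out = creer_matrice_alt matrix
instance (matrix : List (List Int)) (out : List (List Int)) : Decidable (Spec_creer_matrice matrix out) := by unfold Spec_creer_matrice; infer_instance

-- ===== CLAIM (what is proved, stated in full; the proofs are below) =====
def Claim_equal_creer_matrice : Prop := ∀ (matrix : List (List Int)), Dom_creer_matrice matrix → Pre_creer_matrice matrix → Spec_creer_matrice matrix (creer_matrice matrix)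
-- ===== LEMMAS AND PROOFS =====

-- non-zero / zero counts of column j (only rows that reach column j contribute)
def pvNzc : List (List Int) → Nat → Int
  | [], _ => 0
  | r :: rs, j => (if j < r.length ∧ r.getD j 0 ≠ 0 then 1 else 0) + pvNzc rs j

def pvZc : List (List Int) → Nat → Int
  | [], _ => 0
  | r :: rs, j => (if j < r.length ∧ r.getD j 0 = 0 then 1 else 0) + pvZc rs j

-- pair-level mirror of A's state (cell [a,b] as (a,b))
def pvToCell (p : Int × Int) : List Int := [p.1, p.2]

def pvBumpP (x : Int) (p : Int × Int) : Int × Int :=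
  if x = 0 then (p.1, p.2 + 1) else (p.1 + 1, p.2)

def pvRowStepP (acc : List (Int × Int)) (row : List Int) : List (Int × Int) :=
  (List.range row.length).foldl (fun acc j => acc.modify j (pvBumpP (row.getD j 0))) acc

lemma pv_modify_map {α β : Type} (f : α → β) (g : β → β) (h : α → α)
    (hc : ∀ a, g (f a) = f (h a)) (l : List α) (j : Nat) :
    (l.map f).modify j g = (l.modify j h).map f := by
  apply List.ext_getElem?
  intro i
  simp only [List.getElem?_modify, List.getElem?_map]
  cases l[i]? with
  | none => rfl
  | some a =>
    simp only [Option.map_some]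
    split_ifs <;> simp [hc]

lemma pv_bump_map (x : Int) (acc : List (Int × Int)) (j : Nat) :
    (acc.map pvToCell).modify j (pvBumpCell x) = (acc.modify j (pvBumpP x)).map pvToCell := by
  apply pv_modify_map
  intro p
  by_cases hx : x = 0 <;>
    simp [pvBumpCell, pvBumpP, pvToCell, hx, List.modify]

lemma pv_rowstep_map (acc : List (Int × Int)) (row : List Int) :
    pvRowStep (acc.map pvToCell) row = (pvRowStepP acc row).map pvToCell := by
  unfold pvRowStep pvRowStepP
  generalize row.length = n
  induction n generalizing acc with
  | zero => simp
  | succ n ih =>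
    rw [List.range_succ, List.foldl_append, List.foldl_append]
    simp only [List.foldl_cons, List.foldl_nil]
    rw [ih, pv_bump_map]

lemma pv_fold_map (rows : List (List Int)) (acc : List (Int × Int)) :
    rows.foldl pvRowStep (acc.map pvToCell) = (rows.foldl pvRowStepP acc).map pvToCell := by
  induction rows generalizing acc with
  | nil => rfl
  | cons r rs ih => simp only [List.foldl_cons]; rw [pv_rowstep_map, ih]

lemma pv_inner_get (r : List Int) (n : Nat) (acc : List (Int × Int)) (j : Nat) :
    ((List.range n).foldl (fun acc j => acc.modify j (pvBumpP (r.getD j 0))) acc)[j]? =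
      (fun p => if j < n then pvBumpP (r.getD j 0) p else p) <$> acc[j]? := by
  induction n generalizing j with
  | zero => simp
  | succ n ih =>
    rw [List.range_succ, List.foldl_append]
    simp only [List.foldl_cons, List.foldl_nil]
    rw [List.getElem?_modify, ih]
    cases acc[j]? with
    | none => rfl
    | some p =>
      by_cases hjn : n = j
      · subst hjn
        simp
      · by_cases hlt : j < n
        · simp [hjn, hlt, Nat.lt_succ_of_lt hlt]
        · simp [hjn, hlt, show ¬ j < n + 1 by omega]

lemma pv_foldP_get (rows : List (List Int)) (acc : List (Int × Int)) (j : Nat) :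
    (rows.foldl pvRowStepP acc)[j]? =
      (fun p => (p.1 + pvNzc rows j, p.2 + pvZc rows j)) <$> acc[j]? := by
  induction rows generalizing acc with
  | nil =>
    simp [pvNzc, pvZc]
  | cons r rs ih =>
    simp only [List.foldl_cons]
    rw [ih]
    unfold pvRowStepP
    rw [pv_inner_get]
    cases acc[j]? with
    | none => rfl
    | some p =>
      simp only [pvNzc, pvZc, pvBumpP]
      by_cases hl : j < r.length
      · have hg : r.getD j 0 = r[j] := List.getD_eq_getElem r 0 hl
        rw [hg]
        by_cases hz : r[j] = 0 <;>
          simp [hl, hz, Prod.ext_iff] <;> ring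
      · simp [hl]

lemma pv_col_counts (rows : List (List Int)) (j : Nat) :
    ((((rows.filter (fun r => decide (j < r.length))).map (fun r => r.getD j 0)).filter
        (fun x => decide (x ≠ 0))).length : Int) = pvNzc rows j ∧
    (((rows.filter (fun r => decide (j < r.length))).map (fun r => r.getD j 0)).length : Int) =
      pvNzc rows j + pvZc rows j := by
  induction rows with
  | nil => simp [pvNzc, pvZc]
  | cons r rs ih =>
    obtain ⟨ih1, ih2⟩ := ih
    simp only [List.filter_cons, pvNzc, pvZc]
    by_cases hl : j < r.length
    · simp only [hl, decide_true, if_true, List.map_cons, List.filter_cons, true_and]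
      by_cases hz : r.getD j 0 = 0
      · simp only [hz, ne_eq, not_true_eq_false, decide_false, if_false, if_true,
          List.length_cons]
        constructor <;> push_cast [ih1, ih2] <;> omega
      · simp only [hz, ne_eq, not_false_eq_true, decide_true, if_true, if_false,
          List.length_cons]
        constructor <;> push_cast [ih1, ih2] <;> omega
    · simp only [hl, decide_false, Bool.false_eq_true, if_false, false_and, zero_add]
      exact ⟨ih1, ih2⟩

lemma pv_map_const_getElem (l : List Int) (c : Int × Int) (j : Nat) :
    (l.map (fun _ => c))[j]? = if j < l.length then some c else none := by
  by_cases h : j < l.length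
  · simp [h]
  · simp [h]

lemma pv_main (matrix : List (List Int)) : creer_matrice matrix = creer_matrice_alt matrix := by
  apply List.ext_getElem?
  intro j
  unfold creer_matrice creer_matrice_alt
  have hinit : ((matrix.headD []).map (fun _ => ([0, 0] : List Int))) =
      ((matrix.headD []).map (fun _ => ((0 : Int), (0 : Int)))).map pvToCell := by
    rw [List.map_map]; rfl
  rw [hinit, pv_fold_map, List.getElem?_map, pv_foldP_get, pv_map_const_getElem]
  by_cases hj : j < (matrix.headD []).length
  · rw [if_pos hj, List.getElem?_map, List.getElem?_range hj]
    obtain ⟨h1, h2⟩ := pv_col_counts matrix j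
    simp only [Option.map_eq_map, Option.map_some, Option.some.injEq, pvToCell, zero_add]
    rw [h1, h2]
    simp only [List.cons.injEq, and_true]
    exact ⟨trivial, by ring⟩
  · rw [if_neg hj]
    refine (List.getElem?_eq_none ?_).symm
    simpa using Nat.le_of_not_lt hj

-- ===== VERDICT (by name: the statement is the Claim_ definition above) =====
theorem creer_matrice_spec : Claim_equal_creer_matrice := by
  intro matrix _ _
  exact pv_main matrix
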